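-- pv_equiv track=rewrite | github.com/willizdev/compuba | Algoritmos/Introducción a la Programación/Python/Guías/ Guía 7 - Funciones sobre listas (tipos complejos) /p7.py | es_matriz
-- ===== SOURCE A (Python) =====
-- def es_matriz(s: list[list[int]]) -> bool:
--     if len(s) == 0:
--         return False
--     if len(s[0]) == 0:
--         return False
--     for i in s:
--         if len(i) != len(s[0]):
--             return False
--     return True
-- ===== SOURCE B (Python) =====
-- def es_matriz(s: list[list[int]]) -> bool:
--     lengths = {len(r) for r in s}
--     return len(s) > 0 and len(lengths) == 1 and len(s[0]) != 0
-- ===== Notes on version B (the rewrite author's own statement) =====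
-- stated objective: idiomatic
-- what changed: Replaces the early-exit row-by-row comparison against s[0] with a set comprehension of all row lengths whose cardinality is tested, keeping the non-empty and non-empty-first-row checks.
import Mathlib
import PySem

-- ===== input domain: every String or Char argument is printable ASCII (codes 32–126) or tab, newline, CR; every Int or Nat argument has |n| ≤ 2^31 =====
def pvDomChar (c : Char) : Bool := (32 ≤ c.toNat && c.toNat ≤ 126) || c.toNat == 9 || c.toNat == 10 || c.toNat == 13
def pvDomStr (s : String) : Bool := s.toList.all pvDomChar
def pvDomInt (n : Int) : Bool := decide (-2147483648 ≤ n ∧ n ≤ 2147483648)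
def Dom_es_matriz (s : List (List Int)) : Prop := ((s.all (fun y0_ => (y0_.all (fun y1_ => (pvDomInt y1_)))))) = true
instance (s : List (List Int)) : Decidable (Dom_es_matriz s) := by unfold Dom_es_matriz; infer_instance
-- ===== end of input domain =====

-- B replaces A's early-exit scan comparing every row's length to len(s[0]) with a set of
-- all row lengths tested for cardinality 1 (objective: idiomatic); same O(n) cost.

-- ===== PORT A =====
-- the 'for i in s' loop with early 'return False'
def esMatrizLoop (n : Nat) : List (List Int) → Bool
  | [] => true
  | i :: rest => if i.length ≠ n then false else esMatrizLoop n rest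

def es_matriz (s : List (List Int)) : Bool :=
  match s with
  | [] => false
  | r0 :: _ =>
    if r0.length = 0 then false
    else esMatrizLoop r0.length s

-- ===== PORT B =====
def es_matriz_alt (s : List (List Int)) : Bool :=
  let lengths : PySem.Set Nat := PySem.Set.ofList (s.map List.length)
  -- 'len(s) > 0 and len(lengths) == 1 and len(s[0]) != 0'; short-circuit guarantees s[0] exists
  decide (0 < s.length) && decide (lengths.length = 1) && decide ((s.headD []).length ≠ 0)

-- ===== PRECONDITION & SPEC =====
def Spec_es_matriz (s : List (List Int)) (out : Bool) : Prop := out = es_matriz_alt s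
instance (s : List (List Int)) (out : Bool) : Decidable (Spec_es_matriz s out) := by unfold Spec_es_matriz; infer_instance

-- ===== CLAIM (what is proved, stated in full; the proofs are below) =====
def Claim_equal_es_matriz : Prop := ∀ (s : List (List Int)), Dom_es_matriz s → Spec_es_matriz s (es_matriz s)

-- ===== LEMMAS AND PROOFS =====

theorem esMatrizLoop_eq_all (n : Nat) (l : List (List Int)) :
    esMatrizLoop n l = l.all (fun i => i.length == n) := by
  induction l with
  | nil => rfl
  | cons i rest ih =>
    simp only [esMatrizLoop, List.all_cons, ih]
    by_cases h : i.length = n <;> simp [h]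

theorem set_ofList_len_one {α : Type} [BEq α] [LawfulBEq α] (a : α) (t : List α) :
    (PySem.Set.ofList (a :: t)).length = 1 ↔ ∀ x ∈ t, x = a := by
  constructor
  · intro h x hx
    have hm : x ∈ PySem.Set.ofList (a :: t) := by
      rw [PySem.Set.mem_ofList]; exact List.mem_cons_of_mem _ hx
    have ha : a ∈ PySem.Set.ofList (a :: t) := by
      rw [PySem.Set.mem_ofList]; exact List.mem_cons_self
    match hs : PySem.Set.ofList (a :: t) with
    | [y] =>
      rw [hs] at hm ha
      simp at hm ha; rw [hm, ha]
    | [] => rw [hs] at h; simp at h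
    | y :: z :: r => rw [hs] at h; simp at h
  · intro h
    have : PySem.Set.ofList (a :: t) = [a] := by
      have : ∀ (t' : List α), (∀ x ∈ t', x = a) → t'.foldl PySem.Set.add [a] = [a] := by
        intro t'
        induction t' with
        | nil => intro _; rfl
        | cons y r ih =>
          intro hy
          have hya : y = a := hy y List.mem_cons_self
          have : PySem.Set.add [a] y = [a] := by
            simp [PySem.Set.add, PySem.Set.contains, hya]
          simp only [List.foldl_cons, this]
          exact ih (fun x hx => hy x (List.mem_cons_of_mem _ hx))
      rw [PySem.Set.ofList_eq_foldl]
      simp only [List.foldl_cons]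
      have ha1 : PySem.Set.add ([] : List α) a = [a] := rfl
      rw [ha1]
      exact this t h
    rw [this]
    rfl
-- ===== VERDICT (by name: the statement is the Claim_ definition above) =====
theorem es_matriz_spec : Claim_equal_es_matriz := by
  intro s _
  unfold Spec_es_matriz es_matriz es_matriz_alt
  match s with
  | [] => rfl
  | r0 :: rest =>
    simp only [List.map_cons, List.headD_cons, List.length_cons]
    rw [esMatrizLoop_eq_all]
    by_cases h0 : r0.length = 0
    · by_cases h1 : (PySem.Set.ofList (r0.length :: rest.map List.length)).length = 1 <;>
        simp [h0]
    · have := set_ofList_len_one r0.length (rest.map List.length)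
      by_cases hall : ∀ x ∈ rest.map List.length, x = r0.length
      · have h1 : (PySem.Set.ofList (r0.length :: rest.map List.length)).length = 1 :=
          this.mpr hall
        simp only [h0, h1]
        simp only [List.all_cons]
        have : rest.all (fun i => i.length == r0.length) = true := by
          rw [List.all_eq_true]
          intro i hi
          simp only [beq_iff_eq]
          exact hall i.length (List.mem_map_of_mem hi)
        simp [this, h0]
      · have h1 : ¬ (PySem.Set.ofList (r0.length :: rest.map List.length)).length = 1 := by
          intro hc; exact hall (this.mp hc)
        simp only [if_neg h0, h1]
        push Not at hall
        obtain ⟨x, hx, hxne⟩ := hall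
        obtain ⟨i, hi, rfl⟩ := List.mem_map.mp hx
        have : rest.all (fun i => i.length == r0.length) = false := by
          rw [List.all_eq_false]
          exact ⟨i, hi, by simp [hxne]⟩
        simp [List.all_cons, this]
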